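-- pv_equiv track=rewrite | github.com/chongjiayee0156/FIT2004 | 2004_assignment1/assignment1.py | restaurantFinder
-- ===== SOURCE A (Python) =====
-- from typing import List
--
-- def restaurantFinder(d: int, site_list: List[int]):
--     """
--     Function Description:
--       -Solves the restaurant finder problem of finding sites from a list of sites to build restaurant so that maximum
--        revenue is generated with a constraint that no two restaurants can be within 'd' kilometers of each other.
--
--     Precondition:
--       -site_list contains the sites in the order they appear along the freeway, e.g., for each i, the distance between i
--        th and (i + x)th site is x kms.
--       -d is always a non-negative integer
--       -site_list always contains at least 1 site.
--
--     Postcondition: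
--       -The list selected_sites contain the site numbers in ascending order.
--
--     Input:
--       -d: An integer representing the maximum distance between two restaurants.
--       -site_list: A list of integers representing the profit of annual revenue of each restaurant if it is opened at the site.
--
--     Return:
--       -(total_revenue, selected_sites)
--       -total_revenue: An integer representing the e total annual revenue if the company opens restaurants at the sites in
--       selected_sites
--       -selected_sites: A list of integers containing the site numbers where the company should open their restaurants to maximise the revenue
--
--       Time Complexity:
--         Best: O(N), n is length of site_list
--         Worst: O(N), n is length of site_list
--             - Given n is the number of elements in the input list, site_list
--             - Initializing memo and copying input list to a new site_list with placeholder at first index will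
--             be o(n) best/worst case in time
--             - Looping through each site to calculate the max profit will be o(n) best/worst case in time,
--             - Backtracking will be o(n) worst case in time, ie: when d == 0.
--             - o(1) best case in time, ie: when d>len(site_list)
--
--     Space Complexity:
--       Input: O(N), n is length of site_list
--       Aux: O(N), n is length of site_list
--          - New site_list with 1 extra element and memo array all require O(n) aux space
--          - O(n) + O(n)  = O(n).
--
--     """
--     # copy all sites to increase all index by 1 (by introducing a placeholder in the first index)
--     # o(n)
--     site_list = [0] + [site for site in site_list]
--
--     # memo to store the maximum profit from [1..i], including site i
--     # o(n)
--     memo = [0] * len(site_list)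
--
--     for index in range(1, len(site_list)):  # o(n)
--         if index - d <= 0:
--             # current site is within first d sites of site list.
--             # due to d constraint, only 1 site with maximum annual revenue will be chosen among these first d sites
--             # hence, site with max profit among first d sites will be chosen
--             # by comparing profit 1 by 1, we will always get memo[index-1] = max profit possible
--
--             # hence, if current site has more profit than all previous sites, store current site as max profit in the
--             # memo, else, previous site's memo (index-1), which represents the max profit among all
--             # site_list[1..index-1] will be the max profit
--             memo[index] = max(memo[index - 1], site_list[index])
--         else:
--             # current site has the ability to have previous sites
--             # now check whether or nt to include current site to selected sites
--
--             # if include current site, then we can only include max profit of site_list[1...index-d-1] since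
--             # we cant consider selecting previous d sites
--             # if we do not include current site, then the max profit will be the same as previous site in memo array,
--             # since memo array will always have the maximum profit stored in index-1
--
--             # we decide whether or nt to include current site by comparing which of the 2 discussed methods will
--             # generate higher profit
--             if memo[index - 1] > memo[index - d - 1] + site_list[index]:
--                 # higher profit if current site is nt included
--                 memo[index] = memo[index - 1]
--             else:
--                 # higher profit if current site is included
--                 memo[index] = memo[index - d - 1] + site_list[index]
--
--     # since we hv processed all the sits, last element of memo should store the maximum possible profit
--     total_revenue = memo[-1]
--     selected_sites = []
--     # now we backtrack
--     while index > 0:  # o(n) worst case, o(1) best case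
--         # if current max profit is diff from previous site max profit, tht means we have included the current site
--         if memo[index] != memo[index - 1]:
--             selected_sites.append(index)
--             # since this site is included, nxt site which can be considered shd be d distance away
--             index = index - d - 1
--         else:
--             # else, current site is nt included, rpt the same process for index-1 site
--             index -= 1
--
--     # reverse the sites from descending to ascending order
--     selected_sites.reverse()  # o(n)
--
--     # return max revenue and all selected sites for tht revenue
--     return total_revenue, selected_sites
-- ===== SOURCE B (Python) =====
-- from typing import List
--
-- def restaurantFinder(d: int, site_list: List[int]):
--     # Single forward DP: dp[i] = (best revenue using sites 1..i, the selected
--     # site numbers for that revenue). No backtracking pass.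
--     dp = [(0, [])]
--     for i in range(1, len(site_list) + 1):
--         prev_rev, prev_sel = dp[i - 1]
--         j = max(0, i - d - 1)
--         inc_rev = dp[j][0] + site_list[i - 1]
--         if inc_rev > prev_rev:
--             dp.append((inc_rev, dp[j][1] + [i]))
--         else:
--             dp.append((prev_rev, prev_sel))
--     return dp[-1][0], dp[-1][1]
-- ===== Notes on version B (the rewrite author's own statement) =====
-- stated objective: alternative
-- what changed: Replaces A's value-only memo table plus separate backward backtracking pass with a single forward DP that carries the (revenue, selected-sites) pair at each index, so the answer is read off the last DP entry with no backtracking.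
-- outside the precondition, e.g. on restaurantFinder(-1, [0, 0, -1000000007]): A returns (0, []), B raises IndexError
-- crash fix: On an empty site_list A raises UnboundLocalError (its loop variable is never bound before the backtracking while-loop); B returns (0, []). — e.g. on restaurantFinder(0, []): A raises UnboundLocalError, B returns (0, [])
import Mathlib
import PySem

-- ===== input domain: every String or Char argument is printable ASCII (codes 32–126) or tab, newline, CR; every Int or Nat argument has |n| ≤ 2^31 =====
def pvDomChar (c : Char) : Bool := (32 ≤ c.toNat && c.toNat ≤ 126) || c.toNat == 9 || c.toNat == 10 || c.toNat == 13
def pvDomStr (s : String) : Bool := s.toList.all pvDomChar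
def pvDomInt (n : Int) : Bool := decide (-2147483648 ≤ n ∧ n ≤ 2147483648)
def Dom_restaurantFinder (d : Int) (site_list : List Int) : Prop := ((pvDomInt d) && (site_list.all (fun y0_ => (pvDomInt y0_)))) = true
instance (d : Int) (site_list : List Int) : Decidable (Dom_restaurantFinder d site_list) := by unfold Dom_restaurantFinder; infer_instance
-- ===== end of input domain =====

-- B replaces A's value-only memo table + separate backward backtracking pass by a single
-- forward DP carrying (revenue, selected sites) pairs; equal return values on Pre_.

-- ===== PORT A =====
-- A's backtracking while-loop; fuel bounds the iterations (inside Pre_, 0 ≤ d makes the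
-- index strictly decrease, so fuel = memo.length never runs out and the guard is inert).
def pvBacktrackA (memo : List Int) (d : Int) : Nat → Int → List Int → List Int
  | 0, _, acc => acc
  | fuel + 1, index, acc =>
    if 0 < index then
      if PySem.List.pyGetD memo index 0 ≠ PySem.List.pyGetD memo (index - 1) 0 then
        pvBacktrackA memo d fuel (index - d - 1) (acc ++ [index])
      else
        pvBacktrackA memo d fuel (index - 1) acc
    else acc

def restaurantFinder (d : Int) (site_list : List Int) : Int × List Int :=
  -- site_list = [0] + [site for site in site_list]
  let sl : List Int := 0 :: site_list.map (fun site => site)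
  -- memo = [0] * len(site_list)
  let memo0 : List Int := List.replicate sl.length 0
  -- for index in range(1, len(site_list)): … ; the state carries memo and the loop variable
  -- (Python's `index` survives the loop; on an empty range Python raises NameError, outside Pre_)
  let st :=
    (PySem.List.pyRange 1 (PySem.List.len sl)).foldl
      (fun (st : List Int × Int) index =>
        let memo := st.1
        let v :=
          if index - d ≤ 0 then
            max (PySem.List.pyGetD memo (index - 1) 0) (PySem.List.pyGetD sl index 0)
          else
            if PySem.List.pyGetD memo (index - 1) 0 >
                PySem.List.pyGetD memo (index - d - 1) 0 + PySem.List.pyGetD sl index 0 then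
              PySem.List.pyGetD memo (index - 1) 0
            else
              PySem.List.pyGetD memo (index - d - 1) 0 + PySem.List.pyGetD sl index 0
        (PySem.List.pySetD memo index v, index))
      (memo0, 0)
  let memo := st.1
  let total_revenue := PySem.List.pyGetD memo (-1) 0
  let selected_sites := pvBacktrackA memo d memo.length st.2 []
  (total_revenue, selected_sites.reverse)

-- ===== PORT B =====
def restaurantFinder_alt (d : Int) (site_list : List Int) : Int × List Int :=
  -- dp[i] = (best revenue using sites 1..i, selected site numbers for it)
  let dp :=
    (PySem.List.pyRange 1 (PySem.List.len site_list + 1)).foldl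
      (fun (dp : List (Int × List Int)) i =>
        let prev := PySem.List.pyGetD dp (i - 1) (0, [])
        let j := max 0 (i - d - 1)
        let inc_rev := (PySem.List.pyGetD dp j (0, [])).1 + PySem.List.pyGetD site_list (i - 1) 0
        if inc_rev > prev.1 then
          dp ++ [(inc_rev, (PySem.List.pyGetD dp j (0, [])).2 ++ [i])]
        else
          dp ++ [(prev.1, prev.2)])
      [(0, [])]
  ((PySem.List.pyGetD dp (-1) (0, [])).1, (PySem.List.pyGetD dp (-1) (0, [])).2)

-- ===== PRECONDITION & SPEC =====
-- Pre_ excludes negative d (A's backtracking then loops forever or its memo reads go out of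
-- range) and the empty site_list (A's loop variable is unbound: NameError). Both match A's
-- stated precondition (d non-negative, at least one site).
def Pre_restaurantFinder (d : Int) (site_list : List Int) : Prop :=
  0 ≤ d ∧ site_list ≠ []
instance (d : Int) (site_list : List Int) : Decidable (Pre_restaurantFinder d site_list) := by
  unfold Pre_restaurantFinder; infer_instance

def pvWitness_restaurantFinder : Int × List Int := (2, [5, 1, 7])

-- On an empty site_list A raises UnboundLocalError (its loop variable is never bound before
-- the backtracking while-loop); B returns (0, []).
def Raises_restaurantFinder (_d : Int) (site_list : List Int) : Prop := site_list = []
instance (d : Int) (site_list : List Int) : Decidable (Raises_restaurantFinder d site_list) := by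
  unfold Raises_restaurantFinder; infer_instance
def pvRaiseWitness_restaurantFinder : Int × List Int := (0, [])
def pvRaiseWitnessOut_restaurantFinder : Int × List Int := (0, [])

def Spec_restaurantFinder (d : Int) (site_list : List Int) (out : Int × List Int) : Prop := out = restaurantFinder_alt d site_list
instance (d : Int) (site_list : List Int) (out : Int × List Int) : Decidable (Spec_restaurantFinder d site_list out) := by unfold Spec_restaurantFinder; infer_instance

-- ===== CLAIM (what is proved, stated in full; the proofs are below) =====
def Claim_equal_restaurantFinder : Prop := ∀ (d : Int) (site_list : List Int), Dom_restaurantFinder d site_list → Pre_restaurantFinder d site_list → Spec_restaurantFinder d site_list (restaurantFinder d site_list)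
def Claim_raises_restaurantFinder : Prop := (∀ (d : Int) (site_list : List Int), Dom_restaurantFinder d site_list → Raises_restaurantFinder d site_list → ¬ Pre_restaurantFinder d site_list) ∧ (Dom_restaurantFinder (pvRaiseWitness_restaurantFinder.1) (pvRaiseWitness_restaurantFinder.2) ∧ Raises_restaurantFinder (pvRaiseWitness_restaurantFinder.1) (pvRaiseWitness_restaurantFinder.2) ∧ restaurantFinder_alt (pvRaiseWitness_restaurantFinder.1) (pvRaiseWitness_restaurantFinder.2) = pvRaiseWitnessOut_restaurantFinder)

-- ===== LEMMAS AND PROOFS =====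

-- The common DP: pvF d sl i = (best revenue over sites 1..i, its selected 1-based sites).
def pvF (d : Int) (sl : List Int) : Nat → Int × List Int
  | 0 => (0, [])
  | i + 1 =>
    let j := (min (i : Int) (max 0 ((i : Int) - d))).toNat
    let incl := (pvF d sl j).1 + sl.getD i 0
    let prev := pvF d sl i
    if prev.1 < incl then (incl, (pvF d sl j).2 ++ [(i : Int) + 1]) else prev
termination_by i => i
decreasing_by all_goals omega

theorem pvF_succ (d : Int) (sl : List Int) (i : Nat) (hd : 0 ≤ d) :
    pvF d sl (i + 1) =
      (let j := ((i : Int) - d).toNat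
       let incl := (pvF d sl j).1 + sl.getD i 0
       let prev := pvF d sl i
       if prev.1 < incl then (incl, (pvF d sl j).2 ++ [(i : Int) + 1]) else prev) := by
  rw [pvF]
  have h1 : (min (i : Int) (max 0 ((i : Int) - d))) = max 0 ((i : Int) - d) := by omega
  have h2 : (max 0 ((i : Int) - d)).toNat = ((i : Int) - d).toNat := by omega
  simp only [h1, h2]

theorem pvB_fold (d : Int) (sl : List Int) (hd : 0 ≤ d) (k : Nat) :
    (PySem.List.pyRange 1 ((k : Int) + 1)).foldl
      (fun (dp : List (Int × List Int)) i =>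
        let prev := PySem.List.pyGetD dp (i - 1) (0, [])
        let j := max 0 (i - d - 1)
        let inc_rev := (PySem.List.pyGetD dp j (0, [])).1 + PySem.List.pyGetD sl (i - 1) 0
        if inc_rev > prev.1 then
          dp ++ [(inc_rev, (PySem.List.pyGetD dp j (0, [])).2 ++ [i])]
        else
          dp ++ [(prev.1, prev.2)])
      [(0, [])] = (List.range (k + 1)).map (pvF d sl) := by
  induction k with
  | zero =>
    rw [show ((0:Nat):Int) + 1 = 1 by norm_num, PySem.List.pyRange_one_eq_nil (le_refl 1)]
    simp [pvF]
  | succ k ih =>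
    rw [show (((k+1:Nat)):Int) + 1 = ((k:Int)+1) + 1 by push_cast; ring,
      PySem.List.pyRange_one_succ_right (by omega), List.foldl_append, ih,
      List.foldl_cons, List.foldl_nil]
    simp only [show ((k:Int)+1-1) = (k:Int) from by ring]
    have hprev : PySem.List.pyGetD ((List.range (k+1)).map (pvF d sl)) ((k:Int)) (0,([]:List Int)) = pvF d sl k := by
      rw [PySem.List.pyGetD_natCast, PySem.List.getD_map_range _ _ _ _ (by omega)]
    have hjget : PySem.List.pyGetD ((List.range (k+1)).map (pvF d sl)) (max 0 ((k:Int)+1-d-1)) (0,([]:List Int)) = pvF d sl (((k:Int)-d).toNat) := by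
      rw [PySem.List.pyGetD_of_nonneg _ _ (le_max_left _ _),
        show (max 0 ((k:Int)+1-d-1)).toNat = ((k:Int)-d).toNat from by omega,
        PySem.List.getD_map_range _ _ _ _ (by omega)]
    simp only [hprev, hjget, PySem.List.pyGetD_natCast, gt_iff_lt]
    conv_rhs => rw [List.range_succ]
    simp only [List.map_append, List.map_cons, List.map_nil, pvF_succ d sl k hd]
    split_ifs with h
    · rfl
    · rfl

theorem pvA_fold (d : Int) (sl0 : List Int) (hd : 0 ≤ d) (k : Nat) (hk : k ≤ sl0.length) :
    (PySem.List.pyRange 1 ((k : Int) + 1)).foldl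
      (fun (st : List Int × Int) index =>
        let memo := st.1
        let v :=
          if index - d ≤ 0 then
            max (PySem.List.pyGetD memo (index - 1) 0) (PySem.List.pyGetD (0 :: sl0) index 0)
          else
            if PySem.List.pyGetD memo (index - 1) 0 >
                PySem.List.pyGetD memo (index - d - 1) 0 + PySem.List.pyGetD (0 :: sl0) index 0 then
              PySem.List.pyGetD memo (index - 1) 0
            else
              PySem.List.pyGetD memo (index - d - 1) 0 + PySem.List.pyGetD (0 :: sl0) index 0
        (PySem.List.pySetD memo index v, index))
      (List.replicate (sl0.length + 1) 0, 0) =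
      ((List.range (k + 1)).map (fun i => (pvF d sl0 i).1) ++ List.replicate (sl0.length - k) 0,
        if k = 0 then 0 else (k : Int)) := by
  induction k with
  | zero =>
    rw [show ((0:Nat):Int) + 1 = 1 by norm_num, PySem.List.pyRange_one_eq_nil (le_refl 1)]
    simp [pvF, List.replicate_succ]
  | succ k ih =>
    have hk' : k ≤ sl0.length := by omega
    rw [show (((k+1:Nat)):Int) + 1 = ((k:Int)+1) + 1 by push_cast; ring,
      PySem.List.pyRange_one_succ_right (by omega), List.foldl_append, ih hk',
      List.foldl_cons, List.foldl_nil]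
    simp only [show ((k:Int)+1-1) = (k:Int) from by ring,
      show ((k:Int)+1-d-1) = (k:Int)-d from by ring]
    have hprev : PySem.List.pyGetD ((List.range (k+1)).map (fun i => (pvF d sl0 i).1) ++ List.replicate (sl0.length - k) 0) ((k:Int)) 0 = (pvF d sl0 k).1 := by
      rw [PySem.List.pyGetD_natCast, List.getD_append _ _ _ _ (by simp)]
      exact PySem.List.getD_map_range _ _ _ _ (by omega)
    have hsite : PySem.List.pyGetD (0 :: sl0) ((k:Int)+1) 0 = sl0.getD k 0 := by
      rw [show ((k:Int)+1) = (((k+1:Nat)):Int) by push_cast; ring, PySem.List.pyGetD_natCast]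
      simp
    have hv : (if ((k:Int)+1) - d ≤ 0 then
            max ((pvF d sl0 k).1) (sl0.getD k 0)
          else
            if (pvF d sl0 k).1 >
                PySem.List.pyGetD ((List.range (k+1)).map (fun i => (pvF d sl0 i).1) ++ List.replicate (sl0.length - k) 0) ((k:Int)-d) 0 + sl0.getD k 0 then
              (pvF d sl0 k).1
            else
              PySem.List.pyGetD ((List.range (k+1)).map (fun i => (pvF d sl0 i).1) ++ List.replicate (sl0.length - k) 0) ((k:Int)-d) 0 + sl0.getD k 0)
        = (pvF d sl0 (k+1)).1 := by
      rw [pvF_succ d sl0 k hd]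
      by_cases hc : ((k:Int)+1) - d ≤ 0
      · rw [if_pos hc]
        have hj0 : ((k:Int)-d).toNat = 0 := by omega
        rw [hj0]
        simp only [pvF, zero_add, apply_ite (Prod.fst)]
        omega
      · rw [if_neg hc]
        have hread : PySem.List.pyGetD ((List.range (k+1)).map (fun i => (pvF d sl0 i).1) ++ List.replicate (sl0.length - k) 0) ((k:Int)-d) 0 = (pvF d sl0 (((k:Int)-d).toNat)).1 := by
          rw [PySem.List.pyGetD_of_nonneg _ _ (by omega), List.getD_append _ _ _ _ (by simp; omega)]
          exact PySem.List.getD_map_range _ _ _ _ (by omega)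
        rw [hread]
        simp only [gt_iff_lt, apply_ite (Prod.fst)]
        omega
    simp only [hprev, hsite, hv]
    rw [Prod.mk.injEq]
    constructor
    · rw [PySem.List.pySetD_of_nonneg _ _ (by omega),
        show (((k:Int)+1)).toNat = k+1 from by omega, List.set_append]
      rw [if_neg (by simp)]
      simp only [List.length_map, List.length_range, Nat.sub_self]
      rw [show sl0.length - k = (sl0.length - (k+1)) + 1 from by omega, List.replicate_succ,
        List.set_cons_zero]
      conv_rhs => rw [List.range_succ]
      simp
    · simp

theorem pvBacktrack_eq (memo : List Int) (d : Int) (sl : List Int) (hd : 0 ≤ d)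
    (hm : ∀ t : Nat, t ≤ sl.length → memo.getD t 0 = (pvF d sl t).1) :
    ∀ (fuel : Nat) (i : Int) (acc : List Int), i ≤ (sl.length : Int) → i.toNat < fuel →
      pvBacktrackA memo d fuel i acc = acc ++ ((pvF d sl i.toNat).2).reverse := by
  intro fuel
  induction fuel with
  | zero => intro i acc h1 h2; omega
  | succ f ihf =>
    intro i acc h1 h2
    by_cases hpos : 0 < i
    · obtain ⟨m, rfl⟩ : ∃ m : Nat, i = (m:Int)+1 := ⟨(i-1).toNat, by omega⟩
      have hmt : ((m:Int)+1).toNat = m + 1 := by omega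
      rw [pvBacktrackA, if_pos hpos]
      have r1 : PySem.List.pyGetD memo ((m:Int)+1) 0 = (pvF d sl (m+1)).1 := by
        rw [show ((m:Int)+1) = (((m+1:Nat)):Int) by push_cast; ring, PySem.List.pyGetD_natCast]
        exact hm (m+1) (by omega)
      have r0 : PySem.List.pyGetD memo ((m:Int)+1-1) 0 = (pvF d sl m).1 := by
        rw [show ((m:Int)+1-1) = ((m:Nat):Int) by norm_num, PySem.List.pyGetD_natCast]
        exact hm m (by omega)
      rw [r1, r0, hmt, pvF_succ d sl m hd]
      simp only [apply_ite (Prod.fst), apply_ite (Prod.snd)]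
      by_cases hlt : (pvF d sl m).1 < (pvF d sl (((m:Int)-d).toNat)).1 + sl.getD m 0
      · rw [if_pos hlt, if_pos hlt, if_pos (show (pvF d sl (((m:Int)-d).toNat)).1 + sl.getD m 0 ≠ (pvF d sl m).1 from by omega)]
        rw [show ((m:Int)+1-d-1) = (m:Int)-d from by ring,
          ihf ((m:Int)-d) (acc ++ [(m:Int)+1]) (by omega) (by omega)]
        simp [List.reverse_append]
      · rw [if_neg hlt, if_neg hlt, if_neg (by simp)]
        rw [show ((m:Int)+1-1) = ((m:Nat):Int) from by norm_num,
          ihf ((m:Nat):Int) acc (by omega) (by omega)]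
        simp
    · rw [pvBacktrackA, if_neg hpos, show i.toNat = 0 from by omega]
      simp [pvF]

-- ===== VERDICT (by name: the statement is the Claim_ definition above) =====
theorem pvMemoLen (d : Int) (sl : List Int) :
    ((List.range (sl.length + 1)).map (fun i => (pvF d sl i).1)).length = sl.length + 1 := by
  simp

theorem restaurantFinder_spec : Claim_equal_restaurantFinder := by
  intro d sl _ hp
  obtain ⟨hd, hne⟩ := hp
  have hn : 1 ≤ sl.length := List.length_pos_iff.mpr hne
  unfold Spec_restaurantFinder restaurantFinder restaurantFinder_alt
  simp only [List.map_id', PySem.List.len_eq, List.length_cons]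
  rw [show ((sl.length + 1 : Nat) : Int) = ((sl.length : Nat) : Int) + 1 from by push_cast; ring,
    pvA_fold d sl hd sl.length le_rfl, pvB_fold d sl hd sl.length]
  simp only [Nat.sub_self, List.replicate_zero, List.append_nil,
    if_neg (show ¬ sl.length = 0 from by omega)]
  have hlastA : PySem.List.pyGetD ((List.range (sl.length + 1)).map (fun i => (pvF d sl i).1)) (-1) 0 = (pvF d sl sl.length).1 := by
    rw [PySem.List.pyGetD_neg_ofNat _ 1 _ (by omega) (by simp)]
    simp
  have hlastB : PySem.List.pyGetD ((List.range (sl.length + 1)).map (pvF d sl)) (-1) (0, []) = pvF d sl sl.length := by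
    rw [PySem.List.pyGetD_neg_ofNat _ 1 _ (by omega) (by simp)]
    simp
  have hbt : pvBacktrackA ((List.range (sl.length + 1)).map (fun i => (pvF d sl i).1)) d
      (((List.range (sl.length + 1)).map (fun i => (pvF d sl i).1)).length)
      ((sl.length : Nat) : Int) [] = [] ++ ((pvF d sl sl.length).2).reverse := by
    refine pvBacktrack_eq _ d sl hd ?_ _ _ _ (by omega) (by rw [pvMemoLen]; omega)
    · intro t ht
      rw [PySem.List.getD_map_range _ _ _ _ (by omega)]
  rw [hlastA, hlastB, hbt]
  simp

def restaurantFinder_raises : Claim_raises_restaurantFinder := by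
  unfold Claim_raises_restaurantFinder
  exact ⟨fun d sl _ hr hp => hp.2 hr, by decide⟩
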